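-- pv_equiv track=rewrite | github.com/psymoney/prepCodingTest | 백준/BOJ/python/2531.py | answer
-- ===== SOURCE A (Python) =====
-- from collections import defaultdict
--
-- def answer(A: list, k: int, c: int) -> int:
--     streak = defaultdict(int)
--
--     for i in range(k):
--         streak[A[i]] += 1
--     streak[c] += 1
--     kinds = 0
--     for i in range(len(A)):
--         kinds = max(kinds, len(streak))
--
--         streak[A[i]] -= 1
--         if streak[A[i]] == 0:
--             del streak[A[i]]
--         streak[A[(i + k) % len(A)]] += 1
--
--     return kinds
-- ===== SOURCE B (Python) =====
-- def answer(A: list, k: int, c: int) -> int: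
--     n = len(A)
--     best = 0
--     for i in range(n):
--         window = {A[j] if j < n else A[j - n] for j in range(i, i + k)}
--         window.add(c)
--         best = max(best, len(window))
--     return best
-- ===== Notes on version B (the rewrite author's own statement) =====
-- stated objective: simpler
-- what changed: Replaces A's stateful sliding frequency-dict (incremental increment/decrement/delete bookkeeping) with an independent per-start recomputation: each circular window is rebuilt as a set, the coupon added, and a running max of set sizes kept.
-- outside the precondition, e.g. on answer([1, 2], 0, 5): A returns 2, B returns 1; on answer([1, 2], -1, 5): A returns 3, B returns 1
import Mathlib
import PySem

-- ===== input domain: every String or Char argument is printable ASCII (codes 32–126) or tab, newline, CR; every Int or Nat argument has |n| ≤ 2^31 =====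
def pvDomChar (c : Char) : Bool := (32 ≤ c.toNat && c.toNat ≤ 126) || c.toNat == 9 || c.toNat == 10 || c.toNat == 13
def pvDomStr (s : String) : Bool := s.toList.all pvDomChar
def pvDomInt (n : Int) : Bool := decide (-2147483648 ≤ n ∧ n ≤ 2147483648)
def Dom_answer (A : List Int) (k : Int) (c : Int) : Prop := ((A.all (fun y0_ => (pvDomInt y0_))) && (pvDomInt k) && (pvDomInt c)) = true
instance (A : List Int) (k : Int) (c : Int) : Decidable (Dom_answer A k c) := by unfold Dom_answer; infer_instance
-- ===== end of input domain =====

-- B replaces A's stateful sliding frequency-dict with an independent per-window set recomputation (simpler; same return value on the inputs Pre_answer admits).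


-- ===== PORT A =====
def answerStep (A : List Int) (k : Int) (st : PySem.Dict Int Int × Int) (i : Int) : PySem.Dict Int Int × Int :=
  let kinds := max st.2 ((st.1.size : Int))
  let a := PySem.List.pyGetD A i 0
  let d := st.1.modify a 0 (· - 1)
  let d := if d.getD a 0 == 0 then d.erase a else d
  let d := d.modify (PySem.List.pyGetD A (PySem.Int.mod (i + k) (A.length : Int)) 0) 0 (· + 1)
  (d, kinds)

def answer (A : List Int) (k : Int) (c : Int) : Int :=
  let streak0 := (PySem.List.pyRange 0 k 1).foldl
    (fun d i => d.modify (PySem.List.pyGetD A i 0) 0 (· + 1)) PySem.Dict.empty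
  let streak1 := streak0.modify c 0 (· + 1)
  ((PySem.List.pyRange 0 (A.length : Int) 1).foldl (answerStep A k) (streak1, 0)).2

-- ===== PORT B =====
def answer_alt (A : List Int) (k : Int) (c : Int) : Int :=
  (PySem.List.pyRange 0 (A.length : Int) 1).foldl
    (fun best i =>
      let w := PySem.Set.ofList ((PySem.List.pyRange i (i + k) 1).map
        (fun j => if j < (A.length : Int) then PySem.List.pyGetD A j 0
                  else PySem.List.pyGetD A (j - (A.length : Int)) 0))
      let w := PySem.Set.add w c
      max best (PySem.Set.len w)) 0

-- ===== PRECONDITION & SPEC =====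
-- Pre_ admits the task's natural domain 1 ≤ k ≤ len(A) and also every degenerate k ≤ 0 input with at
-- most one plate or all plates equal to c (there both programs return the same value). It excludes
-- k > len(A), where A raises IndexError, and the remaining k ≤ 0 inputs (outside the problem's k ≥ 1
-- domain), where A's defaultdict keeps leftover zero/negative count entries and returns an accidental
-- value that B does not mimic.
def Pre_answer (A : List Int) (k : Int) (c : Int) : Prop :=
  (1 ≤ k ∧ k ≤ (A.length : Int)) ∨ (k ≤ 0 ∧ (A.length ≤ 1 ∨ ∀ x ∈ A, x = c))
instance (A : List Int) (k : Int) (c : Int) : Decidable (Pre_answer A k c) := by unfold Pre_answer; infer_instance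
def pvWitness_answer : List Int × Int × Int := ([1, 2, 1], 2, 5)

def Spec_answer (A : List Int) (k : Int) (c : Int) (out : Int) : Prop := out = answer_alt A k c
instance (A : List Int) (k : Int) (c : Int) (out : Int) : Decidable (Spec_answer A k c out) := by unfold Spec_answer; infer_instance

-- ===== CLAIM (what is proved, stated in full; the proofs are below) =====
def Claim_equal_answer : Prop := ∀ (A : List Int) (k : Int) (c : Int), Dom_answer A k c → Pre_answer A k c → Spec_answer A k c (answer A k c)

-- ===== LEMMAS AND PROOFS =====

-- abbreviations used only by the proofs
def pvF (A : List Int) (t : Int) : Int := PySem.List.pyGetD A (PySem.Int.mod t (A.length : Int)) 0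
def pvWin (A : List Int) (k i : Int) : List Int :=
  (PySem.List.pyRange 0 k 1).map (fun j => PySem.List.pyGetD A (PySem.Int.mod (i + j) (A.length : Int)) 0)

-- loop invariant: the dict d represents exactly the multiset l (counts and key-set)
def pvInv (d : PySem.Dict Int Int) (l : List Int) : Prop :=
  d.keys.Nodup ∧ (∀ x, d.getD x 0 = l.count x) ∧ (∀ x, x ∈ d.keys ↔ x ∈ l)

theorem pv_mod_self (t n : Int) (h0 : 0 ≤ t) (h1 : t < n) : PySem.Int.mod t n = t := by
  rw [PySem.Int.mod_eq_emod_of_pos (by omega)]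
  exact Int.emod_eq_of_lt h0 h1

theorem pv_find?_filter_ne (l : List (Int × Int)) (x y : Int) (h : y ≠ x) :
    List.find? (fun p => p.1 == y) (l.filter (fun p => !(p.1 == x))) =
    List.find? (fun p => p.1 == y) l := by
  induction l with
  | nil => rfl
  | cons a t ih =>
    by_cases ha : a.1 = x
    · have hay : (x == y) = false := by simp; omega
      simp [List.filter_cons, ha, List.find?_cons, hay, ih]
    · simp only [List.filter_cons]
      have : (!(a.1 == x)) = true := by simp [ha]
      rw [this]
      simp only [if_true, List.find?_cons]
      by_cases hay : a.1 = y
      · simp [hay]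
      · have : (a.1 == y) = false := by simp [hay]
        rw [this, ih]

theorem pv_get?_erase_self (d : PySem.Dict Int Int) (x : Int) : (d.erase x).get? x = none := by
  simp only [PySem.Dict.erase, PySem.Dict.get?]
  rw [List.find?_eq_none.mpr, Option.map_none]
  intro p hp
  have := (List.mem_filter.mp hp).2
  simp at this ⊢
  omega

theorem pv_get?_erase_ne (d : PySem.Dict Int Int) (x y : Int) (h : y ≠ x) :
    (d.erase x).get? y = d.get? y := by
  simp only [PySem.Dict.erase, PySem.Dict.get?]
  rw [pv_find?_filter_ne _ _ _ h]

theorem pv_keys_erase (d : PySem.Dict Int Int) (x : Int) :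
    (d.erase x).keys = d.keys.filter (fun z => !(z == x)) := by
  simp only [PySem.Dict.erase, PySem.Dict.keys, List.filter_map]
  rfl

theorem pv_len_eq_of_nodup_mem (l₁ l₂ : List Int) (h₁ : l₁.Nodup) (h₂ : l₂.Nodup)
    (h : ∀ x, x ∈ l₁ ↔ x ∈ l₂) : l₁.length = l₂.length := by
  rw [← List.toFinset_card_of_nodup h₁, ← List.toFinset_card_of_nodup h₂]
  congr 1; ext x; simp [h x]

theorem pv_size_eq (d : PySem.Dict Int Int) (l : List Int) (h : pvInv d l) :
    (d.size : Int) = PySem.Set.len (PySem.Set.ofList l) := by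
  obtain ⟨h1, _, h3⟩ := h
  have hk : d.size = d.keys.length := by
    simp [PySem.Dict.size, PySem.Dict.keys]
  rw [hk, PySem.Set.len]
  have := pv_len_eq_of_nodup_mem d.keys (PySem.Set.ofList l) h1 (PySem.Set.nodup_ofList l)
    (fun x => (h3 x).trans (PySem.Set.mem_ofList l x).symm)
  exact_mod_cast this

theorem pvInv_congr (d : PySem.Dict Int Int) (l l' : List Int)
    (hc : ∀ x, l.count x = l'.count x) (h : pvInv d l) : pvInv d l' := by
  obtain ⟨h1, h2, h3⟩ := h
  refine ⟨h1, fun x => (h2 x).trans (by rw [hc]), fun x => (h3 x).trans ?_⟩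
  constructor <;> intro hx
  · have := List.count_pos_iff.mpr hx; rw [hc] at this; exact List.count_pos_iff.mp this
  · have := List.count_pos_iff.mpr hx; rw [← hc] at this; exact List.count_pos_iff.mp this

theorem pvInv_incr (d : PySem.Dict Int Int) (y : Int) (l : List Int) (h : pvInv d l) :
    pvInv (d.modify y 0 (· + 1)) (l ++ [y]) := by
  obtain ⟨hnd, hcount, hmem⟩ := h
  refine ⟨?_, ?_, ?_⟩
  · simp only [PySem.Dict.modify]
    exact PySem.Dict.nodup_keys_insert _ _ _ hnd
  · intro z
    simp only [PySem.Dict.modify]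
    rw [PySem.Dict.getD_insert]
    by_cases hz : z = y
    · subst hz; rw [if_pos rfl, hcount]
      simp [List.count_append]
    · rw [if_neg hz, hcount]
      simp [List.count_append, List.count_singleton, hz, Ne.symm hz]
  · intro z
    simp only [PySem.Dict.modify]
    rw [PySem.Dict.mem_keys_insert, List.mem_append]
    constructor
    · rintro (rfl | hz)
      · right; simp
      · left; exact (hmem z).mp hz
    · rintro (hz | hz)
      · right; exact (hmem z).mpr hz
      · left; simpa using hz

theorem pvInv_dec (d : PySem.Dict Int Int) (x : Int) (l : List Int) (h : pvInv d (x :: l)) :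
    pvInv (if (d.modify x 0 (· - 1)).getD x 0 == 0 then (d.modify x 0 (· - 1)).erase x
           else (d.modify x 0 (· - 1))) l := by
  obtain ⟨hnd, hcount, hmem⟩ := h
  have hd1getD : ∀ z, (d.modify x 0 (· - 1)).getD z 0 = l.count z := by
    intro z
    simp only [PySem.Dict.modify]
    rw [PySem.Dict.getD_insert]
    by_cases hz : z = x
    · subst hz; rw [if_pos rfl, hcount]; simp [List.count_cons_self]
    · rw [if_neg hz, hcount]; simp [List.count_cons, hz, Ne.symm hz]
  have hd1nd : (d.modify x 0 (· - 1)).keys.Nodup := by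
    simp only [PySem.Dict.modify]
    exact PySem.Dict.nodup_keys_insert _ _ _ hnd
  have hd1mem : ∀ z, z ∈ (d.modify x 0 (· - 1)).keys ↔ z ∈ (x :: l) := by
    intro z
    simp only [PySem.Dict.modify]
    rw [PySem.Dict.mem_keys_insert]
    constructor
    · rintro (rfl | hz)
      · exact List.mem_cons_self
      · exact (hmem z).mp hz
    · intro hz
      right; exact (hmem z).mpr hz
  by_cases hb : (d.modify x 0 (· - 1)).getD x 0 = 0
  · have hx0 : l.count x = 0 := by have := hd1getD x; rw [hb] at this; exact_mod_cast this.symm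
    have hxl : x ∉ l := by
      intro hx; have := List.count_pos_iff.mpr hx; omega
    rw [if_pos (by simp only [beq_iff_eq]; exact hb)]
    refine ⟨?_, ?_, ?_⟩
    · rw [pv_keys_erase]; exact hd1nd.filter _
    · intro z
      by_cases hz : z = x
      · subst hz
        rw [PySem.Dict.getD_eq_get?_getD, pv_get?_erase_self]
        simp [hx0]
      · rw [PySem.Dict.getD_eq_get?_getD, pv_get?_erase_ne _ _ _ hz,
            ← PySem.Dict.getD_eq_get?_getD, hd1getD]
    · intro z
      rw [pv_keys_erase, List.mem_filter]
      constructor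
      · rintro ⟨hz1, hz2⟩
        have hz2' : z ≠ x := by simpa using hz2
        rcases List.mem_cons.mp ((hd1mem z).mp hz1) with rfl | h'
        · exact absurd rfl hz2'
        · exact h'
      · intro hz
        have hzx : z ≠ x := fun h' => hxl (h' ▸ hz)
        exact ⟨(hd1mem z).mpr (List.mem_cons_of_mem _ hz), by simpa using hzx⟩
  · have hxl : x ∈ l := by
      have := hd1getD x
      have hc : l.count x ≠ 0 := by intro h0; apply hb; rw [this, h0]; simp
      exact List.count_pos_iff.mp (by omega)
    rw [if_neg (by simp only [beq_iff_eq]; exact hb)]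
    refine ⟨hd1nd, hd1getD, ?_⟩
    intro z
    rw [hd1mem z]
    constructor
    · intro hz
      rcases List.mem_cons.mp hz with rfl | h'
      · exact hxl
      · exact h'
    · exact List.mem_cons_of_mem _

theorem pvInv_counter (xs : List Int) : pvInv (PySem.Dict.counter xs) xs := by
  refine ⟨PySem.Dict.nodup_keys_counter xs, ?_, ?_⟩
  · intro z; rw [PySem.Dict.getD_counter]
  · intro z; rw [PySem.Dict.keys_counter]; exact PySem.Set.mem_ofList xs z

theorem pvWin_cons (A : List Int) (k i : Int) (hk : 0 < k) :
    pvWin A k i = pvF A i :: (PySem.List.pyRange 0 (k - 1) 1).map (fun j => pvF A (i + 1 + j)) := by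
  obtain ⟨K, hK⟩ : ∃ m, k.toNat = m + 1 := ⟨k.toNat - 1, by omega⟩
  have h1 : ((k : Int) - 0).toNat = K + 1 := by omega
  have h2 : ((k : Int) - 1 - 0).toNat = K := by omega
  unfold pvWin pvF
  rw [PySem.List.pyRange_one, PySem.List.pyRange_one, h1, h2, List.range_succ_eq_map]
  simp only [List.map_cons, List.map_map]
  congr 1
  · norm_num
  · apply List.map_congr_left
    intro m _
    simp only [Function.comp_apply]
    congr 2
    push_cast
    ring

theorem pvWin_succ (A : List Int) (k i : Int) (hk : 0 < k) :
    pvWin A k (i + 1) =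
      ((PySem.List.pyRange 0 (k - 1) 1).map (fun j => pvF A (i + 1 + j))) ++ [pvF A (i + k)] := by
  obtain ⟨K, hK⟩ : ∃ m, k.toNat = m + 1 := ⟨k.toNat - 1, by omega⟩
  have h1 : ((k : Int) - 0).toNat = K + 1 := by omega
  have h2 : ((k : Int) - 1 - 0).toNat = K := by omega
  have hKk : (K : Int) = k - 1 := by omega
  unfold pvWin pvF
  rw [PySem.List.pyRange_one, PySem.List.pyRange_one, h1, h2, List.range_succ]
  simp only [List.map_append, List.map_cons, List.map_nil, List.map_map]
  congr 1
  have : i + 1 + (0 + (K : Int)) = i + k := by omega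
  rw [this]

theorem pv_first_window (A : List Int) (k : Int) (hk : 0 < k) (hkn : k ≤ (A.length : Int)) :
    (PySem.List.pyRange 0 k 1).map (fun i => PySem.List.pyGetD A i 0) = pvWin A k 0 := by
  unfold pvWin
  apply List.map_congr_left
  intro j hj
  rw [PySem.List.mem_pyRange_one] at hj
  rw [zero_add, pv_mod_self j _ hj.1 (lt_of_lt_of_le hj.2 hkn)]

theorem pvF_def (A : List Int) (t : Int) :
    pvF A t = PySem.List.pyGetD A (PySem.Int.mod t (A.length : Int)) 0 := rfl

theorem pv_mod_two (t n : Int) (h0 : 0 ≤ t) (hn : 0 < n) (h2 : t < 2 * n) :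
    PySem.Int.mod t n = if t < n then t else t - n := by
  rw [PySem.Int.mod_eq_emod_of_pos hn]
  split_ifs with h
  · exact Int.emod_eq_of_lt h0 h
  · rw [show t % n = (t - n) % n from (Int.sub_emod_right t n).symm]
    exact Int.emod_eq_of_lt (by omega) (by omega)

theorem pv_winB (A : List Int) (k s : Int) (hk : 0 < k) (hkn : k ≤ (A.length : Int))
    (hs0 : 0 ≤ s) (hsn : s < (A.length : Int)) :
    (PySem.List.pyRange s (s + k) 1).map
      (fun j => if j < (A.length : Int) then PySem.List.pyGetD A j 0
                else PySem.List.pyGetD A (j - (A.length : Int)) 0)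
      = pvWin A k s := by
  unfold pvWin
  rw [PySem.List.pyRange_one s (s + k), PySem.List.pyRange_one 0 k]
  rw [show (s + k - s).toNat = (k - 0).toNat by omega]
  simp only [List.map_map]
  apply List.map_congr_left
  intro m hm
  rw [List.mem_range] at hm
  have hmk : (m : Int) < k := by omega
  simp only [Function.comp_apply]
  rw [show s + ((0 : Int) + (m : Int)) = s + (m : Int) by ring,
      pv_mod_two (s + (m : Int)) _ (by omega) (by omega) (by omega)]
  split_ifs with h
  · rfl
  · rfl

theorem pv_loop (A : List Int) (k c : Int) (hk : 0 < k) (hkn : k ≤ (A.length : Int)) :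
    ∀ (r : Nat) (s : Int), 0 ≤ s → s + r = (A.length : Int) →
    ∀ (d : PySem.Dict Int Int) (kinds : Int), pvInv d (pvWin A k s ++ [c]) →
    ((PySem.List.pyRange s (A.length : Int) 1).foldl (answerStep A k) (d, kinds)).2 =
    (PySem.List.pyRange s (A.length : Int) 1).foldl
      (fun best i =>
        let w := PySem.Set.ofList ((PySem.List.pyRange i (i + k) 1).map
          (fun j => if j < (A.length : Int) then PySem.List.pyGetD A j 0
                    else PySem.List.pyGetD A (j - (A.length : Int)) 0))
        let w := PySem.Set.add w c
        max best (PySem.Set.len w)) kinds := by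
  intro r
  induction r with
  | zero =>
    intro s hs0 hsum d kinds hinv
    rw [PySem.List.pyRange_one_eq_nil (by omega)]
    rfl
  | succ r ih =>
    intro s hs0 hsum d kinds hinv
    have hsn : s < (A.length : Int) := by omega
    have hmods : PySem.Int.mod s (A.length : Int) = s := pv_mod_self s _ hs0 hsn
    rw [PySem.List.pyRange_one_cons hsn, List.foldl_cons, List.foldl_cons]
    simp only [answerStep]
    rw [show PySem.List.pyGetD A s 0 = pvF A s by rw [pvF_def, hmods],
        ← pvF_def A (s + k)]
    simp only [pv_winB A k s hk hkn hs0 hsn]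
    have hinv1 : pvInv d (pvF A s ::
        ((PySem.List.pyRange 0 (k - 1) 1).map (fun j => pvF A (s + 1 + j)) ++ [c])) := by
      rw [← List.cons_append, ← pvWin_cons A k s hk]; exact hinv
    have hdec := pvInv_dec d (pvF A s) _ hinv1
    have hincr := pvInv_incr _ (pvF A (s + k)) _ hdec
    have hinv2 : pvInv ((if ((d.modify (pvF A s) 0 (· - 1)).getD (pvF A s) 0 == 0) then
          (d.modify (pvF A s) 0 (· - 1)).erase (pvF A s)
        else (d.modify (pvF A s) 0 (· - 1))).modify (pvF A (s + k)) 0 (· + 1))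
        (pvWin A k (s + 1) ++ [c]) := by
      apply pvInv_congr _ _ _ _ hincr
      intro x
      rw [pvWin_succ A k s hk]
      simp [List.count_append, List.count_cons]
      omega
    have hsz : (d.size : Int) = PySem.Set.len (PySem.Set.add (PySem.Set.ofList (pvWin A k s)) c) := by
      rw [← PySem.Set.ofList_append_singleton]
      exact pv_size_eq d _ hinv
    rw [hsz]
    exact ih (s + 1) (by omega) (by push_cast at hsum ⊢; omega) _ _ hinv2


-- degenerate k ≤ 0 cases admitted by Pre_: both programs return 0 on [] and 1 otherwise

theorem pv_foldl_max_one (l : List Int) (a : Int) :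
    l.foldl (fun b _ => max b (1 : Int)) a = if l = [] then a else max a 1 := by
  induction l generalizing a with
  | nil => rfl
  | cons x t ih =>
    rw [List.foldl_cons, ih, if_neg (List.cons_ne_nil x t)]
    split_ifs with h
    · rfl
    · rw [max_assoc]; simp

theorem pv_range_ne_nil (n : Nat) (h : n ≠ 0) : PySem.List.pyRange 0 (n : Int) 1 ≠ [] := by
  intro hnil
  have := PySem.List.length_pyRange_one 0 (n : Int)
  rw [hnil] at this
  simp at this
  omega

theorem pv_alt_deg (A : List Int) (k c : Int) (hk : k ≤ 0) :
    answer_alt A k c = if A.length = 0 then 0 else 1 := by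
  unfold answer_alt
  have hbody : ∀ (best i : Int), i ∈ PySem.List.pyRange 0 (A.length : Int) 1 →
      (fun (best i : Int) =>
        let w := PySem.Set.ofList ((PySem.List.pyRange i (i + k) 1).map
          (fun j => if j < (A.length : Int) then PySem.List.pyGetD A j 0
                    else PySem.List.pyGetD A (j - (A.length : Int)) 0))
        let w := PySem.Set.add w c
        max best (PySem.Set.len w)) best i
      = (fun (best : Int) (_ : Int) => max best (1 : Int)) best i := by
    intro best i _
    show (max best (PySem.Set.len (PySem.Set.add (PySem.Set.ofList
        ((PySem.List.pyRange i (i + k) 1).map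
          (fun j => if j < (A.length : Int) then PySem.List.pyGetD A j 0
                    else PySem.List.pyGetD A (j - (A.length : Int)) 0))) c)) : Int)
      = max best 1
    rw [PySem.List.pyRange_one_eq_nil (by omega : i + k ≤ i)]
    rfl
  rw [PySem.List.foldl_congr_mem _ _ _ _ hbody]
  rw [pv_foldl_max_one]
  by_cases h0 : A.length = 0
  · rw [if_pos h0, if_pos]
    exact PySem.List.pyRange_one_eq_nil (by omega)
  · rw [if_neg (pv_range_ne_nil A.length h0), if_neg h0]
    simp

theorem pv_answer_eq (A : List Int) (k c : Int) :
    answer A k c = ((PySem.List.pyRange 0 (A.length : Int) 1).foldl (answerStep A k)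
      (((PySem.List.pyRange 0 k 1).foldl
          (fun d i => d.modify (PySem.List.pyGetD A i 0) 0 (· + 1)) PySem.Dict.empty).modify c 0 (· + 1),
       0)).2 := rfl

theorem pv_streak1_deg (A : List Int) (k c : Int) (hk : k ≤ 0) :
    ((PySem.List.pyRange 0 k 1).foldl
        (fun d i => d.modify (PySem.List.pyGetD A i 0) 0 (· + 1))
        (PySem.Dict.empty : PySem.Dict Int Int)).modify c 0 (· + 1)
      = PySem.Dict.mk [(c, (1 : Int))] := by
  rw [PySem.List.pyRange_one_eq_nil hk]
  simp [PySem.Dict.modify, PySem.Dict.insert, PySem.Dict.getD, PySem.Dict.get?,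
        PySem.Dict.contains, PySem.Dict.empty]

theorem pv_fold_const {α : Type} (f : α × Int → Int → α × Int) (D0 : α) (L : List Int)
    (h : ∀ i ∈ L, ∀ kinds, f (D0, kinds) i = (D0, max kinds 1)) :
    ∀ kinds, (L.foldl f (D0, kinds)).2 = if L = [] then kinds else max kinds 1 := by
  induction L with
  | nil => intro kinds; rfl
  | cons x t ih =>
    intro kinds
    rw [List.foldl_cons, h x List.mem_cons_self kinds,
        ih (fun i hi => h i (List.mem_cons_of_mem _ hi)), if_neg (List.cons_ne_nil x t)]
    split_ifs with ht
    · rfl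
    · rw [max_assoc]; simp

theorem pv_mem_of_range_get (A : List Int) (i : Int) (h0 : 0 ≤ i) (h1 : i < (A.length : Int)) :
    PySem.List.pyGetD A i 0 ∈ A := by
  rw [PySem.List.pyGetD_eq_getElem A 0 h0 h1]
  exact List.getElem_mem _

theorem pv_step_deg (A : List Int) (k c : Int) (hall : ∀ x ∈ A, x = c) :
    ∀ i ∈ PySem.List.pyRange 0 (A.length : Int) 1, ∀ kinds,
      answerStep A k (PySem.Dict.mk [(c, 1)], kinds) i = (PySem.Dict.mk [(c, 1)], max kinds 1) := by
  intro i hi kinds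
  rw [PySem.List.mem_pyRange_one] at hi
  have hn : (0 : Int) < (A.length : Int) := by omega
  have ha : PySem.List.pyGetD A i 0 = c := hall _ (pv_mem_of_range_get A i hi.1 hi.2)
  have hy : PySem.List.pyGetD A (PySem.Int.mod (i + k) (A.length : Int)) 0 = c := by
    refine hall _ (pv_mem_of_range_get A _ ?_ ?_)
    · rw [PySem.Int.mod_eq_emod_of_pos hn]
      exact Int.emod_nonneg _ (by omega)
    · rw [PySem.Int.mod_eq_emod_of_pos hn]
      exact Int.emod_lt_of_pos _ hn
  simp [answerStep, ha, hy, PySem.Dict.modify, PySem.Dict.insert, PySem.Dict.getD,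
        PySem.Dict.get?, PySem.Dict.contains, PySem.Dict.erase, PySem.Dict.size,
        List.find?, List.filter]

theorem pv_a_deg_allc (A : List Int) (k c : Int) (hk : k ≤ 0) (hall : ∀ x ∈ A, x = c)
    (hne : A.length ≠ 0) : answer A k c = 1 := by
  rw [pv_answer_eq]
  rw [pv_streak1_deg A k c hk,
      pv_fold_const (answerStep A k) (PySem.Dict.mk [(c, 1)]) _ (pv_step_deg A k c hall) 0,
      if_neg (pv_range_ne_nil A.length hne)]
  simp

theorem pv_a_deg_one (A : List Int) (k c x : Int) (hA : A = [x]) (hk : k ≤ 0) :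
    answer A k c = 1 := by
  subst hA
  rw [pv_answer_eq]
  rw [pv_streak1_deg [x] k c hk]
  rw [show (((([x] : List Int)).length : Int)) = 0 + 1 by simp,
      PySem.List.pyRange_one_singleton, List.foldl_cons, List.foldl_nil]
  simp [answerStep, PySem.Dict.size]

theorem pv_a_deg_nil (k c : Int) (hk : k ≤ 0) : answer [] k c = 0 := by
  rw [pv_answer_eq]
  rfl

-- ===== VERDICT (by name: the statement is the Claim_ definition above) =====
theorem answer_spec : Claim_equal_answer := by
  intro A k c _ hpre
  rcases hpre with ⟨hk1, hk2⟩ | ⟨hk0, hdeg⟩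
  case inr =>
    unfold Spec_answer
    rw [pv_alt_deg A k c hk0]
    by_cases h0 : A.length = 0
    · rw [if_pos h0]
      obtain rfl : A = [] := List.length_eq_zero_iff.mp h0
      exact pv_a_deg_nil k c hk0
    · rw [if_neg h0]
      rcases hdeg with hn1 | hall
      · have h1 : A.length = 1 := by omega
        obtain ⟨x, hx⟩ := List.length_eq_one_iff.mp h1
        exact pv_a_deg_one A k c x hx hk0
      · exact pv_a_deg_allc A k c hk0 hall h0
  have hk : 0 < k := by omega
  have hstreak : (PySem.List.pyRange 0 k 1).foldl
      (fun d i => d.modify (PySem.List.pyGetD A i 0) 0 (· + 1)) PySem.Dict.empty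
      = PySem.Dict.counter (pvWin A k 0) := by
    rw [← pv_first_window A k hk hk2, PySem.Dict.counter_eq_foldl, List.foldl_map]
  unfold Spec_answer answer answer_alt
  rw [hstreak]
  exact pv_loop A k c hk hk2 A.length 0 le_rfl (by push_cast; omega) _ 0
    (pvInv_incr _ c _ (pvInv_counter (pvWin A k 0)))
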